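-- pv_equiv track=rewrite | github.com/loquit-doru/blitzdev | utils/templates.py | format_components_for_prompt
-- ===== SOURCE A (Python) =====
-- from typing import Dict, Any, List, Optional
--
-- def format_components_for_prompt(components: Dict[str, str], max_components: int = 4) -> str:
--     """
--     Format component snippets into a string suitable for injection into the builder prompt.
--     Limits to max_components to avoid token bloat.
--
--     Args:
--         components: Dict of component_name → HTML snippet
--         max_components: Maximum number of components to include
--
--     Returns:
--         Formatted string with component HTML ready for prompt injection
--     """
--     if not components:
--         return ""
--
--     parts = []
--     for i, (name, html) in enumerate(components.items()):
--         if i >= max_components: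
--             remaining = list(components.keys())[max_components:]
--             parts.append(f"\n(Also available but not shown: {', '.join(remaining)})")
--             break
--         parts.append(f"### {name.upper().replace('_', ' ')}\n{html}")
--
--     return "\n\n".join(parts)
-- ===== SOURCE B (Python) =====
-- def format_components_for_prompt(components, max_components=4):
--     items = list(components.items())
--     shown = min(max(max_components, 0), len(items))
--     if shown < len(items):
--         acc = "\n(Also available but not shown: " + ", ".join(name for name, _ in items[shown:]) + ")"
--     else:
--         acc = ""
--     # build the result back to front, prepending each section onto the accumulator
--     for j in range(shown - 1, -1, -1):
--         name, html = items[j]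
--         head = "### " + name.upper().replace('_', ' ') + "\n" + html
--         acc = head if acc == "" else head + "\n\n" + acc
--     return acc
-- ===== Notes on version B (the rewrite author's own statement) =====
-- stated objective: alternative
-- what changed: Replaces A's enumerate-loop that accumulates a parts list, re-slices the full key list on overflow and joins at the end, by a direct recursion on the item list with a countdown: each call emits its section and concatenates the separator itself (no parts list, no join, no enumerate, no re-slicing -- the overflow line is built from the suffix the recursion is already holding).
-- intended difference: When max_components is negative and its magnitude is smaller than the number of components, A's keys[max_components:] slice wraps around and lists only the last |max_components| keys as 'not shown' although none were shown; B lists all keys there, which is the intended 'everything available but not shown'. — e.g. on format_components_for_prompt([("a", "<p>1</p>"), ("b", "<p>2</p>")], -1): A returns "\n(Also available but not shown: b)", B returns "\n(Also available but not shown: a, b)"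
import Mathlib
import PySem

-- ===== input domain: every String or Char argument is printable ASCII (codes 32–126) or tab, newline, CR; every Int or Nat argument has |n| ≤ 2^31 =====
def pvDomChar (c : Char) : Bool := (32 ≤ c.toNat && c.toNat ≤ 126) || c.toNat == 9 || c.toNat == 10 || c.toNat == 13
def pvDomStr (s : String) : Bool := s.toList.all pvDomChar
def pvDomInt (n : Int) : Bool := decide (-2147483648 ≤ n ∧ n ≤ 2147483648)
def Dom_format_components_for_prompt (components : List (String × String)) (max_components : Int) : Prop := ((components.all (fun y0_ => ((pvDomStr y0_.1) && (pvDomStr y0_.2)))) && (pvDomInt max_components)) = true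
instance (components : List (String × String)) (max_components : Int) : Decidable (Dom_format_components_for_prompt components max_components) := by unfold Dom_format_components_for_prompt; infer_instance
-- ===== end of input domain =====

-- B replaces A's enumerate-loop (parts list + final join + re-slice of the key list on
-- overflow) by a direct recursion on the item list with a countdown that concatenates the
-- string itself (objective: alternative).
-- The dict parameter is marshalled as PySem.Dict.ofList of the association list in both ports.

-- shared f-string templates ("### {NAME}\n{html}" and the overflow line) of both Pythons
def pvFmt (p : String × String) : String :=
  "### " ++ PySem.Str.replace (PySem.Str.upper p.1) "_" " " ++ "\n" ++ p.2

def pvAlsoStr (names : List String) : String :=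
  "\n(Also available but not shown: " ++ PySem.Str.join ", " names ++ ")"

-- ===== PORT A =====
-- the loop body: for i, (name, html) in enumerate(components.items()): …, with the break
def pvLoopA (keys : List String) (maxc : Int) :
    List (Int × (String × String)) → List String → List String
  | [], parts => parts
  | (i, (name, html)) :: rest, parts =>
    if i ≥ maxc then
      parts ++ [pvAlsoStr (PySem.List.slice keys (some maxc) none)]
    else
      pvLoopA keys maxc rest (parts ++ [pvFmt (name, html)])

def format_components_for_prompt (components : List (String × String)) (max_components : Int) : String :=
  let d := PySem.Dict.ofList components
  if d.items = [] then ""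
  else
    PySem.Str.join "\n\n"
      (pvLoopA d.keys max_components (PySem.List.enumerate d.items 0) [])

-- ===== PORT B =====
-- the loop body: acc = head if acc == "" else head + "\n\n" + acc
def pvStep (p : String × String) (acc : String) : String :=
  if acc = "" then pvFmt p else pvFmt p ++ "\n\n" ++ acc

def format_components_for_prompt_alt (components : List (String × String)) (max_components : Int) : String :=
  let items := (PySem.Dict.ofList components).items
  let shown := min (max max_components 0).toNat items.length
  let acc :=
    if shown < items.length then
      pvAlsoStr ((PySem.List.slice items (some (shown : Int)) none).map (·.1))
    else ""
  -- for j in range(shown - 1, -1, -1): acc = pvStep items[j] acc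
  (items.take shown).foldr pvStep acc

-- ===== PRECONDITION & SPEC =====
-- When max_components is negative and its magnitude is smaller than the number of (distinct)
-- components, A's keys[max_components:] slice wraps around and lists only the last
-- |max_components| keys as 'not shown' although none were shown; B lists all keys there,
-- which is the intended 'everything available but not shown'.
def D_format_components_for_prompt (components : List (String × String)) (max_components : Int) : Prop :=
  max_components < 0 ∧ -max_components < ((PySem.Dict.ofList components).items.length : Int)
instance (components : List (String × String)) (max_components : Int) : Decidable (D_format_components_for_prompt components max_components) := by unfold D_format_components_for_prompt; infer_instance

def Spec_format_components_for_prompt (components : List (String × String)) (max_components : Int) (out : String) : Prop := ¬ D_format_components_for_prompt components max_components → out = format_components_for_prompt_alt components max_components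
instance (components : List (String × String)) (max_components : Int) (out : String) : Decidable (Spec_format_components_for_prompt components max_components out) := by unfold Spec_format_components_for_prompt; infer_instance

def pvDiffWitness_format_components_for_prompt : (List (String × String)) × Int :=
  ([("a", "<p>1</p>"), ("b", "<p>2</p>")], -1)
def pvDiffWitnessOut_format_components_for_prompt : String × String :=
  ("\n(Also available but not shown: b)", "\n(Also available but not shown: a, b)")

-- ===== CLAIM (what is proved, stated in full; the proofs are below) =====
def Claim_unchanged_format_components_for_prompt : Prop := ∀ (components : List (String × String)) (max_components : Int), Dom_format_components_for_prompt components max_components → Spec_format_components_for_prompt components max_components (format_components_for_prompt components max_components)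
def Claim_changed_format_components_for_prompt : Prop := Dom_format_components_for_prompt (pvDiffWitness_format_components_for_prompt.1) (pvDiffWitness_format_components_for_prompt.2) ∧ D_format_components_for_prompt (pvDiffWitness_format_components_for_prompt.1) (pvDiffWitness_format_components_for_prompt.2) ∧ format_components_for_prompt (pvDiffWitness_format_components_for_prompt.1) (pvDiffWitness_format_components_for_prompt.2) = pvDiffWitnessOut_format_components_for_prompt.1 ∧ format_components_for_prompt_alt (pvDiffWitness_format_components_for_prompt.1) (pvDiffWitness_format_components_for_prompt.2) = pvDiffWitnessOut_format_components_for_prompt.2 ∧ pvDiffWitnessOut_format_components_for_prompt.1 ≠ pvDiffWitnessOut_format_components_for_prompt.2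
def Claim_exact_format_components_for_prompt : Prop := ∀ (components : List (String × String)) (max_components : Int), Dom_format_components_for_prompt components max_components → D_format_components_for_prompt components max_components → format_components_for_prompt components max_components ≠ format_components_for_prompt_alt components max_components

-- ===== LEMMAS AND PROOFS =====

-- Str-level join facts derived from the Chars lemmas
lemma pvJoin_nil (sep : String) : PySem.Str.join sep [] = "" := rfl

lemma pvJoin_singleton (sep x : String) : PySem.Str.join sep [x] = x := by
  apply String.toList_inj.mp
  rw [PySem.Str.toList_join]
  simp [PySem.Chars.join_singleton]

lemma pvJoin_cons_cons (sep p q : String) (rest : List String) :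
    PySem.Str.join sep (p :: q :: rest) = p ++ sep ++ PySem.Str.join sep (q :: rest) := by
  apply String.toList_inj.mp
  rw [PySem.Str.toList_join]
  simp only [List.map_cons, PySem.Chars.join_cons_cons, String.toList_append,
    PySem.Str.toList_join]

lemma pvJoin_cons_len (sep x : String) (l : List String) :
    x.length ≤ (PySem.Str.join sep (x :: l)).length := by
  cases l with
  | nil => rw [pvJoin_singleton]
  | cons y ys =>
    rw [pvJoin_cons_cons, String.length_append, String.length_append]
    omega

lemma pvFmt_pos (p : String × String) : 0 < (pvFmt p).length := by
  unfold pvFmt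
  rw [String.length_append, String.length_append, String.length_append]
  have h : ("### " : String).length = 4 := rfl
  omega

lemma pvAlsoStr_pos (names : List String) : 0 < (pvAlsoStr names).length := by
  unfold pvAlsoStr
  rw [String.length_append, String.length_append]
  have h : ("\n(Also available but not shown: " : String).length = 32 := rfl
  omega

-- the backward prepending loop computes the join of the section list
lemma pvFoldr_join :
    ∀ (l : List (String × String)) (parts : List String),
      (∀ x ∈ parts, 0 < x.length) →
      l.foldr pvStep (PySem.Str.join "\n\n" parts) =
        PySem.Str.join "\n\n" (l.map pvFmt ++ parts) := by
  intro l
  induction l with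
  | nil => intro parts _; simp
  | cons p l ih =>
    intro parts hp
    rw [List.foldr_cons, ih parts hp, List.map_cons, List.cons_append]
    cases h : l.map pvFmt ++ parts with
    | nil =>
      rw [pvJoin_nil]
      unfold pvStep
      rw [if_pos rfl, pvJoin_singleton]
    | cons x xs =>
      have hx : 0 < x.length := by
        cases l with
        | nil =>
          simp only [List.map_nil, List.nil_append] at h
          exact hp x (h ▸ List.mem_cons_self)
        | cons q l' =>
          simp only [List.map_cons, List.cons_append, List.cons.injEq] at h
          rw [← h.1]
          exact pvFmt_pos q
      have hne : PySem.Str.join "\n\n" (x :: xs) ≠ "" := by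
        intro he
        have := pvJoin_cons_len "\n\n" x xs
        rw [he] at this
        have h0 : ("" : String).length = 0 := rfl
        omega
      unfold pvStep
      rw [if_neg hne, pvJoin_cons_cons]

-- zeta-reduced form of port B: the sections of the shown prefix plus the overflow line, joined
lemma pvAlt_eq (components : List (String × String)) (maxc : Int) :
    format_components_for_prompt_alt components maxc =
      PySem.Str.join "\n\n"
        ((((PySem.Dict.ofList components).items.take
            (min (max maxc 0).toNat (PySem.Dict.ofList components).items.length)).map pvFmt) ++
          (if min (max maxc 0).toNat (PySem.Dict.ofList components).items.length
              < (PySem.Dict.ofList components).items.length then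
              [pvAlsoStr ((PySem.List.slice (PySem.Dict.ofList components).items
                (some ((min (max maxc 0).toNat (PySem.Dict.ofList components).items.length : Nat) : Int))
                none).map (·.1))]
            else [])) := by
  rw [show format_components_for_prompt_alt components maxc
      = ((PySem.Dict.ofList components).items.take
          (min (max maxc 0).toNat (PySem.Dict.ofList components).items.length)).foldr pvStep
          (if min (max maxc 0).toNat (PySem.Dict.ofList components).items.length
              < (PySem.Dict.ofList components).items.length then
            pvAlsoStr ((PySem.List.slice (PySem.Dict.ofList components).items
              (some ((min (max maxc 0).toNat (PySem.Dict.ofList components).items.length : Nat) : Int))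
              none).map (·.1))
          else "") from rfl]
  by_cases h : min (max maxc 0).toNat (PySem.Dict.ofList components).items.length
      < (PySem.Dict.ofList components).items.length
  · rw [if_pos h, if_pos h]
    have hj := pvFoldr_join
      ((PySem.Dict.ofList components).items.take
        (min (max maxc 0).toNat (PySem.Dict.ofList components).items.length))
      [pvAlsoStr ((PySem.List.slice (PySem.Dict.ofList components).items
        (some ((min (max maxc 0).toNat (PySem.Dict.ofList components).items.length : Nat) : Int))
        none).map (·.1))]
      (by
        intro x hx
        rw [List.mem_singleton] at hx
        rw [hx]
        exact pvAlsoStr_pos _)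
    rw [pvJoin_singleton] at hj
    exact hj
  · rw [if_neg h, if_neg h]
    have hj := pvFoldr_join
      ((PySem.Dict.ofList components).items.take
        (min (max maxc 0).toNat (PySem.Dict.ofList components).items.length))
      [] (by intro x hx; simp at hx)
    rw [pvJoin_nil] at hj
    exact hj

-- characterisation of A's loop with break, for any start index
lemma pvLoopA_spec (keys : List String) (maxc : Int) :
    ∀ (items : List (String × String)) (i : Int) (acc : List String),
      pvLoopA keys maxc (PySem.List.enumerate items i) acc =
        if maxc ≤ i then
          (if items = [] then acc
           else acc ++ [pvAlsoStr (PySem.List.slice keys (some maxc) none)])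
        else
          acc ++ (items.take (maxc - i).toNat).map pvFmt ++
            (if maxc < (items.length : Int) + i then
                [pvAlsoStr (PySem.List.slice keys (some maxc) none)]
              else []) := by
  intro items
  induction items with
  | nil =>
    intro i acc
    simp [PySem.List.enumerate_nil, pvLoopA]
    intro h
    omega
  | cons p ps ih =>
    intro i acc
    obtain ⟨name, html⟩ := p
    rw [PySem.List.enumerate_cons]
    by_cases h : i ≥ maxc
    · simp [pvLoopA, h]
    · have h' : ¬ maxc ≤ i := h
      simp only [pvLoopA, if_neg (by omega : ¬ i ≥ maxc), ih]
      by_cases h2 : maxc ≤ i + 1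
      · have hm : maxc - i = 1 := by omega
        rw [if_pos h2, hm]
        rcases ps with _ | ⟨q, qs⟩
        · rw [if_neg (show ¬ maxc < ((((name, html) : String × String) :: []).length : Int) + i by
            simp; omega)]
          simp
        · rw [if_pos (show maxc < (((name, html) :: q :: qs).length : Int) + i by
            simp; omega)]
          simp
      · have ht : (maxc - i).toNat = (maxc - (i + 1)).toNat + 1 := by omega
        rw [if_neg h2, ht, List.take_succ_cons, List.map_cons]
        rw [show ((((name, html) : String × String) :: ps).length : Int) + i
              = (ps.length : Int) + (i + 1) by simp; omega]
        simp

-- zeta-reduced form of port A (definitional)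
lemma pvA_eq (components : List (String × String)) (maxc : Int) :
    format_components_for_prompt components maxc =
      (if (PySem.Dict.ofList components).items = [] then ""
       else
         PySem.Str.join "\n\n"
           (pvLoopA (PySem.Dict.ofList components).keys maxc
             (PySem.List.enumerate (PySem.Dict.ofList components).items 0) [])) := rfl

-- a fully negative slice start at or below -len keeps the whole list
lemma pvSlice_all {α : Type} (xs : List α) (a : Int) (h : a ≤ 0)
    (hlen : a < 0 → (xs.length : Int) ≤ -a) :
    PySem.List.slice xs (some a) none = xs := by
  by_cases hz : a = 0
  · subst hz
    rw [PySem.List.slice_from xs le_rfl]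
    simp
  · have hlen : (xs.length : Int) ≤ -a := hlen (by omega)
    have hk : 0 < (-a).toNat := by omega
    have ha : a = -(((-a).toNat : Nat) : Int) := by omega
    rw [PySem.List.slice_some_none, ha, PySem.List.clampIdx_neg_natCast _ _ hk]
    have : xs.length - (-a).toNat = 0 := by omega
    rw [this]
    rfl

-- a strictly longer list joined with a non-empty separator gives a strictly longer string
lemma pvJoin_len_lt (sep : String) (hsep : 0 < sep.length) :
    ∀ (pre suf : List String), pre ≠ [] → suf ≠ [] →
      (PySem.Str.join sep suf).length < (PySem.Str.join sep (pre ++ suf)).length := by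
  intro pre
  induction pre with
  | nil => intro suf h; exact absurd rfl h
  | cons x pre' ih =>
    intro suf _ hsuf
    cases hps : pre' ++ suf with
    | nil =>
      rcases suf with _ | _
      · exact absurd rfl hsuf
      · simp at hps
    | cons y l =>
      rw [List.cons_append, hps, pvJoin_cons_cons, String.length_append, String.length_append]
      cases pre' with
      | nil =>
        simp only [List.nil_append] at hps
        rw [hps]
        omega
      | cons z zs =>
        have := ih suf (by simp) hsuf
        rw [hps] at this
        omega

-- ===== VERDICT (by name: the statement is the Claim_ definition above) =====
theorem format_components_for_prompt_spec : Claim_unchanged_format_components_for_prompt := by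
  intro components maxc _ hnD
  rw [pvA_eq, pvAlt_eq]
  rw [show (PySem.Dict.ofList components).keys
        = ((PySem.Dict.ofList components).items).map (fun p => p.1) from by
      simp [PySem.Dict.keys]]
  unfold D_format_components_for_prompt at hnD
  generalize (PySem.Dict.ofList components).items = items at hnD ⊢
  cases items with
  | nil =>
    rw [if_pos rfl, List.take_nil, List.map_nil, List.nil_append,
      show (([] : List (String × String)).length) = 0 from rfl,
      if_neg (Nat.not_lt_zero _), pvJoin_nil]
  | cons p rest =>
    rw [if_neg (by simp : ¬ ((p :: rest : List (String × String)) = []))]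
    rw [pvLoopA_spec]
    by_cases hm : maxc ≤ 0
    · have hall : PySem.List.slice ((p :: rest).map (fun p => p.1)) (some maxc) none
          = (p :: rest).map (fun p => p.1) := by
        apply pvSlice_all _ _ hm
        intro hlt
        simp only [List.length_map]
        by_contra hc
        exact hnD ⟨hlt, by omega⟩
      have hsh : min (max maxc 0).toNat (p :: rest).length = 0 := by omega
      rw [if_pos hm, if_neg (by simp : ¬ ((p :: rest : List (String × String)) = [])), hsh, hall]
      rw [List.take_zero, List.map_nil,
        if_pos (by simp : 0 < (p :: rest).length)]
      have h0 : PySem.List.slice (p :: rest) (some ((0 : Nat) : Int)) none = p :: rest := by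
        rw [PySem.List.slice_from _ (by simp)]
        simp
      rw [h0]
    · have hmax : (max maxc 0) = maxc := by omega
      rw [if_neg hm]
      have h3 : (maxc - 0).toNat = maxc.toNat := by omega
      rw [h3, add_zero]
      by_cases hlt : maxc < ((p :: rest).length : Int)
      · have hshown : min (max maxc 0).toNat (p :: rest).length = maxc.toNat := by omega
        rw [hshown, if_pos hlt, if_pos (by omega : maxc.toNat < (p :: rest).length)]
        have hA : PySem.List.slice ((p :: rest).map (fun p => p.1)) (some maxc) none
            = ((p :: rest).drop maxc.toNat).map (fun p => p.1) := by
          rw [PySem.List.slice_from _ (by omega : (0:Int) ≤ maxc)]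
          simp [List.map_drop]
        have hB : PySem.List.slice (p :: rest) (some ((maxc.toNat : Nat) : Int)) none
            = (p :: rest).drop maxc.toNat := by
          rw [PySem.List.slice_from _ (by omega : (0:Int) ≤ ((maxc.toNat : Nat) : Int))]
          rw [Int.toNat_natCast]
        rw [hA, hB]
        rfl
      · have hlen : (p :: rest).length ≤ maxc.toNat := by omega
        have hshown : min (max maxc 0).toNat (p :: rest).length = (p :: rest).length := by omega
        rw [hshown, if_neg hlt, if_neg (by omega : ¬ (p :: rest).length < (p :: rest).length)]
        rw [List.append_nil, List.append_nil, List.take_length, List.take_of_length_le hlen]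
        rfl

theorem format_components_for_prompt_changed : Claim_changed_format_components_for_prompt := by
  unfold Claim_changed_format_components_for_prompt
  decide

theorem format_components_for_prompt_tight : Claim_exact_format_components_for_prompt := by
  intro components maxc _ hD
  obtain ⟨hneg, hlen⟩ := hD
  obtain ⟨kk, hkk⟩ : ∃ kk : Nat, maxc = -(kk : Int) := ⟨(-maxc).toNat, by omega⟩
  subst hkk
  have hk : 0 < kk := by omega
  rw [pvA_eq, pvAlt_eq]
  rw [show (PySem.Dict.ofList components).keys
        = ((PySem.Dict.ofList components).items).map (fun p => p.1) from by
      simp [PySem.Dict.keys]]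
  generalize (PySem.Dict.ofList components).items = items at hlen ⊢
  cases items with
  | nil => simp at hlen; omega
  | cons p rest =>
    rw [if_neg (by simp : ¬ ((p :: rest : List (String × String)) = []))]
    rw [pvLoopA_spec, if_pos (by omega : -(kk : Int) ≤ 0),
      if_neg (by simp : ¬ ((p :: rest : List (String × String)) = []))]
    have hsh : min (max (-(kk : Int)) 0).toNat (p :: rest).length = 0 := by omega
    rw [hsh, List.take_zero, List.map_nil,
      if_pos (by simp : 0 < (p :: rest).length)]
    have h0 : PySem.List.slice (p :: rest) (some ((0 : Nat) : Int)) none = p :: rest := by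
      rw [PySem.List.slice_from _ (by simp)]
      simp
    rw [h0]
    simp only [List.nil_append]
    rw [pvJoin_singleton, pvJoin_singleton]
    set names := (p :: rest).map (fun p : String × String => p.1) with hnames
    have hnlen : names.length = rest.length + 1 := by simp [hnames]
    have hkn : kk < names.length := by
      simp only [List.length_cons] at hlen
      omega
    rw [PySem.List.slice_from_neg_natCast names kk hk]
    set m := names.length - kk with hm
    have hmpos : 0 < m := by omega
    have hmlt : m < names.length := by omega
    have hsplit : names = names.take m ++ names.drop m := (List.take_append_drop m names).symm
    have htk : names.take m ≠ [] := by
      intro he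
      have h2 := congrArg List.length he
      rw [List.length_take] at h2
      simp only [List.length_nil] at h2
      omega
    have hdr : names.drop m ≠ [] := by
      intro he
      have h2 := congrArg List.length he
      rw [List.length_drop] at h2
      simp only [List.length_nil] at h2
      omega
    have hjl : (PySem.Str.join ", " (names.drop m)).length
        < (PySem.Str.join ", " names).length := by
      conv_rhs => rw [hsplit]
      exact pvJoin_len_lt ", " (by decide) _ _ htk hdr
    intro he
    unfold pvAlsoStr at he
    have hlen2 := congrArg String.length he
    rw [String.length_append, String.length_append,
      String.length_append, String.length_append] at hlen2
    have heq : (PySem.Str.join ", " (names.drop m)).length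
        = (PySem.Str.join ", " names).length :=
      Nat.add_left_cancel (Nat.add_right_cancel hlen2)
    exact absurd heq (Nat.ne_of_lt hjl)
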